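-- pv_equiv track=rewrite | github.com/cockpit-project/cockpit | test/common/lcov.py | parse_vlq
-- ===== SOURCE A (Python) =====
-- B64 = {c: i for i, c in
--        enumerate('ABCDEFGHIJKLMNOPQRSTUVWXYZabcdefghijklmnopqrstuvwxyz'
--                  '0123456789+/')}
--
-- def parse_vlq(segment):
--     """Parse a string of VLQ-encoded data.
--     Returns:
--       a list of integers.
--     """
--
--     values = []
--
--     cur, shift = 0, 0
--     for c in segment:
--         val = B64[c]
--         # Each character is 6 bits:
--         # 5 of value and the high bit is the continuation.
--         val, cont = val & 0b11111, val >> 5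
--         cur += val << shift
--         shift += 5
--
--         if not cont:
--             # The low bit of the unpacked value is the sign.
--             cur, sign = cur >> 1, cur & 1
--             if sign:
--                 cur = -cur
--             values.append(cur)
--             cur, shift = 0, 0
--
--     if cur or shift:
--         raise Exception('leftover cur/shift in vlq decode')
--
--     return values
-- ===== SOURCE B (Python) =====
-- B64 = {c: i for i, c in
--        enumerate('ABCDEFGHIJKLMNOPQRSTUVWXYZabcdefghijklmnopqrstuvwxyz'
--                  '0123456789+/')}
--
-- def parse_vlq(segment):
--     """Parse a string of VLQ-encoded data.
--     Returns:
--       a list of integers.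
--     """
--     # Pass 1: split the segment into completed groups of 6-bit values,
--     # closing a group whenever the continuation bit is clear.
--     groups = []
--     acc = []
--     for c in segment:
--         v = B64[c]
--         acc.append(v)
--         if not (v >> 5):
--             groups.append(acc)
--             acc = []
--     if acc:
--         raise Exception('leftover cur/shift in vlq decode')
--
--     # Pass 2: reduce each group to an integer (back-to-front Horner),
--     # then extract the sign from the low bit.
--     values = []
--     for g in groups:
--         n = 0
--         for v in reversed(g):
--             n = (v & 0b11111) + (n << 5)
--         values.append(-(n >> 1) if n & 1 else n >> 1)
--     return values
-- ===== Notes on version B (the rewrite author's own statement) =====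
-- stated objective: alternative
-- what changed: Replaces A's single stateful loop (running accumulator cur/shift mutated per character) by a two-phase decomposition: first split the segment into completed groups at clear continuation bits, then decode each group independently by a back-to-front Horner reduction.
import Mathlib
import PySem

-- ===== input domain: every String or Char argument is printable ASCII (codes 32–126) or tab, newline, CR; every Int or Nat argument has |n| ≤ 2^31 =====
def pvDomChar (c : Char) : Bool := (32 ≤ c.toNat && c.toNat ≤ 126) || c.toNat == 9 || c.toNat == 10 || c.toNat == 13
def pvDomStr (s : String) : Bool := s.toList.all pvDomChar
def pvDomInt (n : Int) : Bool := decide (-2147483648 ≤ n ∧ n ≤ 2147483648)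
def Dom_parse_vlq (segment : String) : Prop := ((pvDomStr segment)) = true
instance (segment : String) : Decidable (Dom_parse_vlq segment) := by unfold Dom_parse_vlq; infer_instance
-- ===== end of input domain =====

-- B re-implements A as two passes (group at clear continuation bits, then decode each
-- group by back-to-front Horner) instead of A's single stateful cur/shift loop;
-- same cost, different decomposition.

-- ===== PORT A =====
-- the B64 alphabet (Python's B64 dict maps a character to its index here)
def pvB64Alphabet : List Char :=
  "ABCDEFGHIJKLMNOPQRSTUVWXYZabcdefghijklmnopqrstuvwxyz0123456789+/".toList

-- B64[c]; an invalid character raises KeyError in Python (excluded by Pre_),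
-- here idxOf returns 64 there (never reached under Pre_)
def pvB64 (c : Char) : Nat := pvB64Alphabet.idxOf c

-- one iteration of A's loop over the state (values, cur, shift)
def pvAStep (st : List Int × Nat × Nat) (c : Char) : List Int × Nat × Nat :=
  let v := pvB64 c
  let val := v % 32          -- val & 0b11111
  let cont := v / 32         -- val >> 5
  let cur := st.2.1 + val * 2 ^ st.2.2   -- cur += val << shift
  let shift := st.2.2 + 5
  if cont = 0 then
    let sign := cur % 2      -- cur & 1
    let cur2 := cur / 2      -- cur >> 1
    let out : Int := if sign = 1 then -(cur2 : Int) else (cur2 : Int)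
    (st.1 ++ [out], 0, 0)
  else
    (st.1, cur, shift)

def parse_vlq (segment : String) : List Int :=
  let st := segment.toList.foldl pvAStep ([], 0, 0)
  -- Python raises 'leftover cur/shift in vlq decode' when st.2 ≠ (0, 0); Pre_ excludes those inputs
  st.1

-- ===== PORT B =====
-- pass 1: split into completed groups of 6-bit values, plus the dangling open group
def pvSplitGroups : List Char → List Nat → List (List Nat) × List Nat
  | [], acc => ([], acc)
  | c :: rest, acc =>
    let v := pvB64 c
    if v / 32 = 0 then         -- continuation bit clear: close the group
      let r := pvSplitGroups rest []
      ((acc ++ [v]) :: r.1, r.2)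
    else
      pvSplitGroups rest (acc ++ [v])

-- pass 2, inner reduction: n = sum of (g[i] & 31) << (5*i), folded back-to-front (Horner)
def pvHorner : List Nat → Nat
  | [] => 0
  | v :: rest => v % 32 + 32 * pvHorner rest

def pvDecodeGroup (g : List Nat) : Int :=
  let n := pvHorner g
  if n % 2 = 1 then -((n / 2 : Nat) : Int) else ((n / 2 : Nat) : Int)

def parse_vlq_alt (segment : String) : List Int :=
  let r := pvSplitGroups segment.toList []
  -- a non-empty dangling group r.2 raises in Python; Pre_ excludes those inputs
  r.1.map pvDecodeGroup

-- ===== PRECONDITION & SPEC =====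
-- Pre_ admits exactly the inputs on which Python A returns: every character is a B64
-- character (else KeyError) and the last character, if any, has its continuation bit
-- clear (else the final group is unterminated and A raises Exception).
def Pre_parse_vlq (segment : String) : Prop :=
  (segment.toList.all (fun c => pvB64Alphabet.contains c)
    && segment.toList.getLast?.all (fun c => decide (pvB64 c < 32))) = true
instance (segment : String) : Decidable (Pre_parse_vlq segment) := by
  unfold Pre_parse_vlq; infer_instance

def pvWitness_parse_vlq : String := "uDt7T"

def Spec_parse_vlq (segment : String) (out : List Int) : Prop := out = parse_vlq_alt segment
instance (segment : String) (out : List Int) : Decidable (Spec_parse_vlq segment out) := by unfold Spec_parse_vlq; infer_instance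

-- ===== CLAIM (what is proved, stated in full; the proofs are below) =====
def Claim_equal_parse_vlq : Prop := ∀ (segment : String), Dom_parse_vlq segment → Pre_parse_vlq segment → Spec_parse_vlq segment (parse_vlq segment)

-- ===== LEMMAS AND PROOFS =====

lemma pvHorner_append (acc : List Nat) (v : Nat) :
    pvHorner (acc ++ [v]) = pvHorner acc + v % 32 * 32 ^ acc.length := by
  induction acc with
  | nil => simp [pvHorner]
  | cons a t ih => simp [pvHorner, ih]; ring

-- the loop invariant: A's fold started with cur = pvHorner acc, shift = 5*|acc|
-- produces the values of B's completed groups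
lemma pv_loop_eq (cs : List Char) : ∀ (acc : List Nat) (values : List Int),
    (List.foldl pvAStep (values, pvHorner acc, 5 * acc.length) cs).1
      = values ++ (pvSplitGroups cs acc).1.map pvDecodeGroup := by
  induction cs with
  | nil => intro acc values; simp [pvSplitGroups]
  | cons c rest ih =>
    intro acc values
    have hcur : pvHorner acc + (pvB64 c) % 32 * 2 ^ (5 * acc.length)
        = pvHorner (acc ++ [pvB64 c]) := by
      rw [pvHorner_append]
      congr 1
      rw [Nat.pow_mul]
    by_cases h : pvB64 c / 32 = 0
    · simp only [List.foldl, pvAStep, pvSplitGroups, h]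
      simp only [hcur, if_true]
      have h0 : (0 : Nat) = pvHorner [] := rfl
      have h5 : (0 : Nat) = 5 * ([] : List Nat).length := rfl
      rw [show ((values ++ [if pvHorner (acc ++ [pvB64 c]) % 2 = 1 then
            -(↑(pvHorner (acc ++ [pvB64 c]) / 2) : Int) else
            (↑(pvHorner (acc ++ [pvB64 c]) / 2) : Int)], (0 : Nat), (0 : Nat))
          : List Int × Nat × Nat)
        = (values ++ [pvDecodeGroup (acc ++ [pvB64 c])], pvHorner [], 5 * ([] : List Nat).length)
        from by simp [pvDecodeGroup, pvHorner]]
      rw [ih [] (values ++ [pvDecodeGroup (acc ++ [pvB64 c])])]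
      simp
    · simp only [List.foldl, pvAStep, pvSplitGroups, h]
      simp only [hcur, if_false]
      have hlen : 5 * acc.length + 5 = 5 * (acc ++ [pvB64 c]).length := by
        simp; ring
      rw [hlen, ih (acc ++ [pvB64 c]) values]

-- ===== VERDICT (by name: the statement is the Claim_ definition above) =====
theorem parse_vlq_spec : Claim_equal_parse_vlq := by
  intro segment _ _
  unfold Spec_parse_vlq parse_vlq parse_vlq_alt
  have h := pv_loop_eq segment.toList [] []
  simpa [pvHorner] using h
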